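-- pv_equiv track=rewrite | github.com/william-frazier/CS200 | HW09.py | BSWNRZ
-- ===== SOURCE A (Python) =====
-- def BSWNRZ(length):
--     """
--     Returns a list of all possible bit sequences of a given length with
--     no repeating zeroes (00).
--     """
--
--     #no bit sequences possible
--     if length == 0:
--         return []
--     #hard coding the base case
--     elif length == 1:
--         return ['1', '0']
--     else:
--         #use a set so as to only return unique results
--         final = set()
--         #recursive call to build strings
--         for i in BSWNRZ(length-1):
--             #can add a 0 to the end only if string ends in a 1
--             if i[-1] == "1":
--                 j = i + '0'
--                 final.add(j)
--             #can always add a 1 to the end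
--             i += '1'
--             final.add(i)
--         #return in list format
--         return list(final)
-- ===== SOURCE B (Python) =====
-- def BSWNRZ(length):
--     """
--     Returns a list of all possible bit sequences of a given length with
--     no repeating zeroes (00).
--
--     Bottom-up instead of recursive: grow the level-k sequences from the
--     level-(k-1) list with a comprehension, deduplicated through a set
--     exactly as the original does.
--     """
--     if length == 0:
--         return []
--     current = ['1', '0']
--     for _ in range(2, length + 1):
--         current = list(set(s + c for s in current
--                            for c in (('0', '1') if s.endswith('1') else ('1',))))
--     return current
-- ===== Notes on version B (the rewrite author's own statement) =====
-- stated objective: simpler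
-- what changed: Replaces the linear recursion with explicit conditional set.add calls by a bottom-up loop that builds each level in one comprehension fed through set(); the recursion and the per-element branch-and-add bookkeeping disappear.
import Mathlib
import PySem

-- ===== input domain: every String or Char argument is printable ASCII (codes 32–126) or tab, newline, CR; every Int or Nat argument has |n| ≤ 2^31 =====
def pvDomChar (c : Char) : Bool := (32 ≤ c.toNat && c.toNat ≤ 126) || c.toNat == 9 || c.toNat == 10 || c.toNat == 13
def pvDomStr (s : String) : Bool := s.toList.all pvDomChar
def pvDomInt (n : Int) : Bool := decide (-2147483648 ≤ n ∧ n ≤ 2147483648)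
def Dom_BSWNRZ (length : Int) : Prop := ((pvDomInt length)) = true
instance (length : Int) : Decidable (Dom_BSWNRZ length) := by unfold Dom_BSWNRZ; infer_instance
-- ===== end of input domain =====

-- B replaces A's linear recursion with explicit conditional set.add calls by a
-- bottom-up loop building each level in one comprehension fed through set()
-- (objective: simpler).  Both ports model a Python set in first-insertion order
-- (PySem.Set), under which the two ports agree exactly as lists.

-- ===== PORT A =====
-- A recurses on length-1; on Int we recurse on the Nat value (Pre_ restricts to 0 ≤ length,
-- where length.toNat is faithful; for negative length Python A never returns).
def BSWNRZgo : Nat → List String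
  | 0 => []
  | 1 => ["1", "0"]
  | n + 2 =>
    -- final = set(); for i in BSWNRZ(length-1): if i[-1]=="1": final.add(i+'0'); final.add(i+'1')
    let final : PySem.Set String :=
      (BSWNRZgo (n + 1)).foldl (fun final i =>
        let final := if PySem.Str.pyGet? i (-1) == some '1'
                     then PySem.Set.add final (i ++ "0") else final
        PySem.Set.add final (i ++ "1")) PySem.Set.empty
    final

def BSWNRZ (length : Int) : List String := BSWNRZgo length.toNat

-- ===== PORT B =====
def BSWNRZ_alt (length : Int) : List String :=
  if length == 0 then []
  else
    (PySem.List.pyRange 2 (length + 1) 1).foldl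
      (fun current _ =>
        PySem.Set.ofList (current.flatMap (fun s =>
          if PySem.Str.endswith s "1" then [s ++ "0", s ++ "1"] else [s ++ "1"])))
      ["1", "0"]

-- ===== PRECONDITION & SPEC =====
-- Pre_ excludes negative length, on which Python A recurses without a base case
-- (RecursionError); it admits every input A returns on.
def Pre_BSWNRZ (length : Int) : Prop := 0 ≤ length
instance (length : Int) : Decidable (Pre_BSWNRZ length) := by unfold Pre_BSWNRZ; infer_instance
def pvWitness_BSWNRZ : Int := (4)

def Spec_BSWNRZ (length : Int) (out : List String) : Prop := out = BSWNRZ_alt length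
instance (length : Int) (out : List String) : Decidable (Spec_BSWNRZ length out) := by unfold Spec_BSWNRZ; infer_instance

-- ===== CLAIM (what is proved, stated in full; the proofs are below) =====
def Claim_equal_BSWNRZ : Prop := ∀ (length : Int), Dom_BSWNRZ length → Pre_BSWNRZ length → Spec_BSWNRZ length (BSWNRZ length)

-- ===== LEMMAS AND PROOFS =====

theorem pvCond_eq (s : String) :
    (PySem.Str.pyGet? s (-1) == some '1') = PySem.Str.endswith s "1" := by
  have h1 : PySem.Str.pyGet? s (-1) = s.toList.getLast? := by
    simp [PySem.List.pyGet?_neg_one]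
  have h2 : PySem.Str.endswith s "1" = PySem.Chars.endswith s.toList ['1'] := by simp
  rw [Bool.eq_iff_iff, beq_iff_eq, h1, List.getLast?_eq_some_iff, h2,
      PySem.Chars.endswith_iff]
  constructor
  · rintro ⟨l', hl⟩; exact ⟨l', hl.symm⟩
  · rintro ⟨l', hl⟩; exact ⟨l', hl.symm⟩
theorem pvAppend_inj {s t : String} {c d : Char}
    (h : s ++ String.ofList [c] = t ++ String.ofList [d]) : s = t ∧ c = d := by
  have h2 : s.toList ++ [c] = t.toList ++ [d] := by
    have := congrArg String.toList h
    simpa using this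
  have h3 := List.append_inj' h2 (by simp)
  exact ⟨String.toList_injective h3.1, by simpa using h3.2⟩
def pvChild (s : String) : List String :=
  if PySem.Str.endswith s "1" then [s ++ "0", s ++ "1"] else [s ++ "1"]

lemma pvOf0 : ("0" : String) = String.ofList ['0'] := rfl
lemma pvOf1 : ("1" : String) = String.ofList ['1'] := rfl

lemma pvChild_nodup (s : String) : (pvChild s).Nodup := by
  unfold pvChild
  split
  · refine List.nodup_cons.mpr ⟨?_, by simp⟩
    simp only [List.mem_singleton, pvOf0, pvOf1]
    intro h
    exact absurd (pvAppend_inj h).2 (by decide)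
  · simp

lemma pvChild_disjoint {s t : String} (h : s ≠ t) :
    ∀ x ∈ pvChild s, x ∉ pvChild t := by
  intro x hx ht
  unfold pvChild at hx ht
  have hs' : ∃ c ∈ ['0','1'], x = s ++ String.ofList [c] := by
    split at hx <;> simp only [List.mem_cons, List.not_mem_nil, or_false] at hx <;>
      rcases hx with rfl | rfl <;> simp [pvOf0, pvOf1]
  have ht' : ∃ d ∈ ['0','1'], x = t ++ String.ofList [d] := by
    split at ht <;> simp only [List.mem_cons, List.not_mem_nil, or_false] at ht <;>
      rcases ht with rfl | rfl <;> simp [pvOf0, pvOf1]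
  obtain ⟨c, -, rfl⟩ := hs'
  obtain ⟨d, -, hd⟩ := ht'
  exact h (pvAppend_inj hd).1

lemma pvFlatMap_nodup {l : List String} (h : l.Nodup) :
    (l.flatMap pvChild).Nodup := by
  rw [List.nodup_flatMap]
  refine ⟨fun s _ => pvChild_nodup s, ?_⟩
  exact h.imp (fun hne => by
    rw [Function.onFun, List.disjoint_left]
    exact fun {x} hx => pvChild_disjoint hne x hx)
lemma pvFoldA_eq (l : List String) : ∀ acc : List String,
    (acc ++ l.flatMap pvChild).Nodup →
    l.foldl (fun final i =>
        let final := if PySem.Str.pyGet? i (-1) == some '1'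
                     then PySem.Set.add final (i ++ "0") else final
        PySem.Set.add final (i ++ "1")) acc = acc ++ l.flatMap pvChild := by
  induction l with
  | nil => intro acc _; simp
  | cons i l ih =>
    intro acc h
    rw [List.flatMap_cons, ← List.append_assoc] at h ⊢
    have h1 : (acc ++ pvChild i).Nodup := h.sublist (List.sublist_append_left _ _)
    have hstep :
        PySem.Set.add (if PySem.Str.pyGet? i (-1) == some '1'
                       then PySem.Set.add acc (i ++ "0") else acc) (i ++ "1")
          = acc ++ pvChild i := by
      rw [pvCond_eq]
      unfold pvChild at h1 ⊢
      cases hb : PySem.Str.endswith i "1"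
      case true =>
        simp only [hb, if_true] at h1 ⊢
        rw [List.nodup_append] at h1
        obtain ⟨-, h2, h3⟩ := h1
        have ha : (i ++ "0") ∉ acc := fun hm => h3 _ hm _ (by simp) rfl
        have hb1 : (i ++ "1") ∉ acc := fun hm => h3 _ hm _ (by simp) rfl
        have hab : (i ++ "1") ≠ (i ++ "0") := by simp
        rw [PySem.Set.add_of_not_mem ha, PySem.Set.add_of_not_mem (by
          simp only [List.mem_append, List.mem_singleton]
          rintro (hm | hm)
          · exact hb1 hm
          · exact hab hm)]
        simp
      case false =>
        simp only [hb, Bool.false_eq_true, if_false] at h1 ⊢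
        rw [List.nodup_append] at h1
        obtain ⟨-, -, h3⟩ := h1
        have hb1 : (i ++ "1") ∉ acc := fun hm => h3 _ hm _ (by simp) rfl
        rw [PySem.Set.add_of_not_mem hb1]
    rw [List.foldl_cons]
    simp only [hstep]
    exact ih (acc ++ pvChild i) h
lemma pvLevel_nodup : ∀ n, (BSWNRZgo n).Nodup
  | 0 => by simp [BSWNRZgo]
  | 1 => by simp [BSWNRZgo]
  | (n+2) => by
    have h := pvLevel_nodup (n+1)
    have e : BSWNRZgo (n+2) = [] ++ (BSWNRZgo (n+1)).flatMap pvChild := by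
      show ((BSWNRZgo (n+1)).foldl _ PySem.Set.empty : List String) = _
      exact pvFoldA_eq _ _ (by simpa using pvFlatMap_nodup h)
    rw [e]
    simpa using pvFlatMap_nodup h

lemma pvLevel_succ (n : Nat) :
    BSWNRZgo (n + 2) = (BSWNRZgo (n + 1)).flatMap pvChild := by
  have h := pvLevel_nodup (n+1)
  show ((BSWNRZgo (n+1)).foldl _ PySem.Set.empty : List String) = _
  have := pvFoldA_eq (BSWNRZgo (n+1)) [] (by simpa using pvFlatMap_nodup h)
  simpa using this

lemma pvAlt_nat : ∀ n : Nat, BSWNRZ_alt ((n : Nat) : Int) = BSWNRZgo n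
  | 0 => by simp [BSWNRZ_alt, BSWNRZgo]
  | 1 => by
    rw [BSWNRZ_alt]
    rw [if_neg (by decide), PySem.List.pyRange_one_eq_nil (by norm_num)]
    rfl
  | (n+2) => by
    have ih := pvAlt_nat (n+1)
    rw [BSWNRZ_alt, if_neg (by simp; omega), show ((n+2 : Nat) : Int) + 1 = (((n+1 : Nat) : Int) + 1) + 1 by push_cast; ring,
        PySem.List.pyRange_one_succ_right (by push_cast; omega), List.foldl_append]
    rw [BSWNRZ_alt, if_neg (by simp; omega)] at ih
    rw [ih, List.foldl_cons, List.foldl_nil, pvLevel_succ]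
    exact PySem.Set.ofList_eq_self_of_nodup _ (pvFlatMap_nodup (pvLevel_nodup (n+1)))

-- ===== VERDICT (by name: the statement is the Claim_ definition above) =====
theorem BSWNRZ_spec : Claim_equal_BSWNRZ := by
  intro length _ hpre
  have h : ((length.toNat : Nat) : Int) = length := Int.toNat_of_nonneg hpre
  unfold Spec_BSWNRZ BSWNRZ
  rw [← h, pvAlt_nat, Int.toNat_natCast]
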